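-- pv_equiv track=rewrite | github.com/Gililk48/kmerlib | kmerlib-git/kmerlib/kmerlib.py | rolling_canonical_kmers
-- ===== SOURCE A (Python) =====
-- _DNA2BIT = {ord("A"): 0, ord("C"): 1, ord("G"): 2, ord("T"): 3}
--
-- _RC2BIT  = {0: 3, 1: 2, 2: 1, 3: 0}
--
-- def rolling_canonical_kmers(seq: str, k: int = 30):
--     if len(seq) < k:
--         return
--     mask  = (1 << (2 * k)) - 1
--     high2 = 2 * (k - 1)
--     fwd = rev = n = 0
--     for ch in seq.encode("ascii"):
--         bits = _DNA2BIT.get(ch, 255)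
--         if bits == 255:                # N or invalid
--             n = fwd = rev = 0
--             continue
--         fwd = ((fwd << 2) | bits) & mask
--         rev = (rev >> 2) | (_RC2BIT[bits] << high2)
--         n += 1
--         if n >= k:
--             yield min(fwd, rev)
-- ===== SOURCE B (Python) =====
-- _DNA2BIT = {ord("A"): 0, ord("C"): 1, ord("G"): 2, ord("T"): 3}
--
-- _RC2BIT  = {0: 3, 1: 2, 2: 1, 3: 0}
--
-- def rolling_canonical_kmers(seq: str, k: int = 30):
--     data = seq.encode("ascii")
--     for i in range(len(data) - k + 1):
--         window = data[i:i + k]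
--         if all(b in _DNA2BIT for b in window):
--             fwd = 0
--             for b in window:
--                 fwd = (fwd << 2) | _DNA2BIT[b]
--             rev = 0
--             for b in reversed(window):
--                 rev = (rev << 2) | _RC2BIT[_DNA2BIT[b]]
--             yield min(fwd, rev)
-- ===== Notes on version B (the rewrite author's own statement) =====
-- stated objective: simpler
-- what changed: Replaces the rolling 2-bit window update with run-reset state by a direct per-window recompute: for each start index, if the k-character slice is all valid bases, encode it forward and reverse-complement from scratch and yield the minimum.
-- outside the precondition, e.g. on rolling_canonical_kmers('', 0): A returns [], B returns [0]; on rolling_canonical_kmers('N', 0): A returns [], B returns [0, 0]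
import Mathlib
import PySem

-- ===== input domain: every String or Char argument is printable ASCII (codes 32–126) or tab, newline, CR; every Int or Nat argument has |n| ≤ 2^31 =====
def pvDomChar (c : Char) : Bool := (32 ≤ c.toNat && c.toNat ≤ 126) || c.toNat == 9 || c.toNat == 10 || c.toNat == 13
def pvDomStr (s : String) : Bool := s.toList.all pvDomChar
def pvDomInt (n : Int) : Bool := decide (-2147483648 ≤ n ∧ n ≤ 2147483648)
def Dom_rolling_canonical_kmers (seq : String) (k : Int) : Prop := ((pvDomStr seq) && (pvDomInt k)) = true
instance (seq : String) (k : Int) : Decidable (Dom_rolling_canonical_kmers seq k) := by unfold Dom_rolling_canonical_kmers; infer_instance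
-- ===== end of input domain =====

-- B replaces A's rolling 2-bit window update (with run-reset state) by a direct per-window
-- recompute of the forward and reverse-complement encodings: simpler, same result, not faster.

-- ===== PORT A =====
-- _DNA2BIT.get(ch, 255) followed by 'if bits == 255' is ported as an Option lookup (none = invalid)
def pvDna2bit? (c : Char) : Option Int :=
  if c = 'A' then some 0 else if c = 'C' then some 1
  else if c = 'G' then some 2 else if c = 'T' then some 3 else none

-- _RC2BIT = {0: 3, 1: 2, 2: 1, 3: 0}
def pvRc2bit (b : Int) : Int :=
  if b = 0 then 3 else if b = 1 then 2 else if b = 2 then 1 else 0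

-- the loop body of A (state fwd, rev, n, out); the bit operations are ported arithmetically,
-- each exact on the values that reach them:
--   (fwd << 2 | bits) & mask   =  (fwd*4 + bits) mod (mask+1)   (fwd ≥ 0, 0 ≤ bits < 4, mask+1 = 2^(2k))
--   (rev >> 2) | (rc << high2) =  (rev >>> 2) + rc * 2^high2    (disjoint nonneg bit ranges: rev < 2^(2k), rc < 4)
def pvStepA (k mask high2p : Int) (st : Int × Int × Int × List Int) (ch : Char) :
    Int × Int × Int × List Int :=
  match pvDna2bit? ch with
  | none => (0, 0, 0, st.2.2.2)                      -- n = fwd = rev = 0; continue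
  | some bits =>
    let fwd := PySem.Int.mod (st.1 * 4 + bits) (mask + 1)
    let rev := (st.2.1 >>> (2 : Nat)) + pvRc2bit bits * high2p
    let n := st.2.2.1 + 1
    (fwd, rev, n, if k ≤ n then st.2.2.2 ++ [min fwd rev] else st.2.2.2)

def rolling_canonical_kmers (seq : String) (k : Int) : List Int :=
  if (seq.toList.length : Int) < k then []
  else
    let mask : Int := 2 ^ (2 * k).toNat - 1          -- (1 << 2*k) - 1
    let high2p : Int := 2 ^ (2 * (k - 1)).toNat      -- 1 << (2*(k-1))
    (seq.toList.foldl (pvStepA k mask high2p) (0, 0, 0, [])).2.2.2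

-- ===== PORT B =====
def rolling_canonical_kmers_alt (seq : String) (k : Int) : List Int :=
  let data := seq.toList
  (PySem.List.pyRange 0 ((data.length : Int) - k + 1) 1).foldl (fun out i =>
    let window := PySem.List.slice data (some i) (some (i + k))
    if window.all (fun c => (pvDna2bit? c).isSome) then
      let fwd := window.foldl (fun f c => f * 4 + (pvDna2bit? c).getD 0) 0
      let rev := window.reverse.foldl (fun r c => r * 4 + pvRc2bit ((pvDna2bit? c).getD 0)) 0
      out ++ [min fwd rev]
    else out) []

-- ===== PRECONDITION & SPEC =====
-- Pre_ excludes k ≤ 0, outside the function's natural domain: there Python A raises ValueError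
-- (negative shift count) whenever k < 0, or for k = 0 as soon as a valid base occurs; on the
-- remaining k = 0 inputs without any ACGT character A's empty yield is a degenerate corner where
-- B's zero-width windows (one 0 per position) are equally defensible.
def Pre_rolling_canonical_kmers (seq : String) (k : Int) : Prop := 1 ≤ k
instance (seq : String) (k : Int) : Decidable (Pre_rolling_canonical_kmers seq k) := by
  unfold Pre_rolling_canonical_kmers; infer_instance

def pvWitness_rolling_canonical_kmers : String × Int := ("ACGTAC", 3)

def Spec_rolling_canonical_kmers (seq : String) (k : Int) (out : List Int) : Prop := out = rolling_canonical_kmers_alt seq k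
instance (seq : String) (k : Int) (out : List Int) : Decidable (Spec_rolling_canonical_kmers seq k out) := by unfold Spec_rolling_canonical_kmers; infer_instance

-- ===== CLAIM (what is proved, stated in full; the proofs are below) =====
def Claim_equal_rolling_canonical_kmers : Prop := ∀ (seq : String) (k : Int), Dom_rolling_canonical_kmers seq k → Pre_rolling_canonical_kmers seq k → Spec_rolling_canonical_kmers seq k (rolling_canonical_kmers seq k)

-- ===== LEMMAS AND PROOFS =====

-- validity test, 2-bit value, and the two encodings of a window
def pvValid (c : Char) : Bool := (pvDna2bit? c).isSome
def pvBit (c : Char) : Int := (pvDna2bit? c).getD 0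
def pvEncF (w : List Char) : Int := w.foldl (fun f c => f * 4 + pvBit c) 0
def pvEncR (w : List Char) : Int := w.reverse.foldl (fun r c => r * 4 + (3 - pvBit c)) 0

theorem pvBit_of_some {c : Char} {b : Int} (h : pvDna2bit? c = some b) :
    pvBit c = b ∧ 0 ≤ b ∧ b ≤ 3 ∧ pvRc2bit b = 3 - b ∧ pvValid c = true := by
  unfold pvDna2bit? at h
  split_ifs at h <;> injection h with hb <;> subst hb <;>
    simp_all [pvBit, pvRc2bit, pvValid, pvDna2bit?]

theorem pvBit_bounds {c : Char} (h : pvValid c = true) : 0 ≤ pvBit c ∧ pvBit c ≤ 3 := by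
  unfold pvValid pvDna2bit? at h
  split_ifs at h <;> simp_all [pvBit, pvDna2bit?]

theorem pvFoldl_affine (g : Char → Int) (l : List Char) (a : Int) :
    l.foldl (fun f c => f * 4 + g c) a = a * 4 ^ l.length + l.foldl (fun f c => f * 4 + g c) 0 := by
  induction l generalizing a with
  | nil => simp
  | cons c t ih =>
    simp only [List.foldl_cons, List.length_cons]
    rw [ih (a * 4 + g c), ih (0 * 4 + g c)]; ring

theorem pvEncF_append (w : List Char) (c : Char) : pvEncF (w ++ [c]) = pvEncF w * 4 + pvBit c := by
  simp [pvEncF]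

theorem pvEncF_cons (c : Char) (t : List Char) :
    pvEncF (c :: t) = pvBit c * 4 ^ t.length + pvEncF t := by
  simp only [pvEncF, List.foldl_cons]
  rw [pvFoldl_affine]; ring

theorem pvEncR_append (w : List Char) (c : Char) :
    pvEncR (w ++ [c]) = (3 - pvBit c) * 4 ^ w.length + pvEncR w := by
  simp only [pvEncR, List.reverse_append, List.reverse_cons, List.reverse_nil, List.nil_append,
    List.singleton_append, List.foldl_cons]
  rw [pvFoldl_affine (fun c => 3 - pvBit c) w.reverse (0 * 4 + (3 - pvBit c)),
    List.length_reverse]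
  ring

theorem pvEncR_cons (c : Char) (t : List Char) :
    pvEncR (c :: t) = pvEncR t * 4 + (3 - pvBit c) := by
  simp [pvEncR]

theorem pvEncF_bounds {w : List Char} (h : w.all pvValid = true) :
    0 ≤ pvEncF w ∧ pvEncF w < 4 ^ w.length := by
  induction w with
  | nil => simp [pvEncF]
  | cons c t ih =>
    simp only [List.all_cons, Bool.and_eq_true] at h
    obtain ⟨hb1, hb2⟩ := pvBit_bounds h.1
    obtain ⟨ih1, ih2⟩ := ih h.2
    rw [pvEncF_cons]
    constructor
    · positivity
    · have hp : (0:Int) < 4 ^ t.length := by positivity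
      simp only [List.length_cons, pow_succ]
      nlinarith

theorem pvEncR_bounds {w : List Char} (h : w.all pvValid = true) :
    0 ≤ pvEncR w ∧ pvEncR w < 4 ^ w.length := by
  induction w with
  | nil => simp [pvEncR]
  | cons c t ih =>
    simp only [List.all_cons, Bool.and_eq_true] at h
    obtain ⟨hb1, hb2⟩ := pvBit_bounds h.1
    obtain ⟨ih1, ih2⟩ := ih h.2
    rw [pvEncR_cons]
    refine ⟨by nlinarith, ?_⟩
    have hp : (0:Int) < 4 ^ t.length := by positivity
    simp only [List.length_cons, pow_succ]
    nlinarith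

-- the common reference value: one canonical k-mer per all-valid window of length K
def pvWins (K : Nat) (l : List Char) : List Int :=
  (List.range (l.length + 1 - K)).filterMap (fun i =>
    if ((l.drop i).take K).all pvValid then
      some (min (pvEncF ((l.drop i).take K)) (pvEncR ((l.drop i).take K))) else none)

def pvTW (l : List Char) : List Char := l.reverse.takeWhile pvValid
def pvS (K : Nat) (l : List Char) : List Char := ((pvTW l).take K).reverse

-- takeWhile reaches depth K iff the first K elements are all valid
-- A's run state, described from the right end: takeWhile of the reverse, first K chars reversed
theorem pvTW_len_iff (l : List Char) (K : Nat) (hK : K ≤ l.length) :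
    K ≤ (l.takeWhile pvValid).length ↔ (l.take K).all pvValid = true := by
  induction l generalizing K with
  | nil => simp_all
  | cons c t ih =>
    cases K with
    | zero => simp
    | succ K =>
      by_cases hc : pvValid c
      · simp only [List.takeWhile_cons, hc, if_true, List.take_succ_cons, List.all_cons,
          List.length_cons, Nat.succ_le_succ_iff, Bool.true_and]
        exact ih K (by simpa using hK)
      · simp [hc]

theorem pvTW_take_eq {l : List Char} {K : Nat} (h : K ≤ (l.takeWhile pvValid).length) :
    (l.takeWhile pvValid).take K = l.take K := by
  obtain ⟨t, ht⟩ := List.takeWhile_prefix (l := l) pvValid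
  conv_rhs => rw [← ht]
  rw [List.take_append_of_le_length h]

-- the K-suffix window of l, reversed, is the K-prefix of l.reverse
theorem pvWindow_reverse (l : List Char) (K : Nat) :
    ((l.drop (l.length - K))).reverse = l.reverse.take K := by
  rw [List.take_reverse]

theorem pvS_all_valid (K : Nat) (l : List Char) : (pvS K l).all pvValid = true := by
  simp only [pvS, List.all_reverse]
  have h := List.all_takeWhile (l := l.reverse) (p := pvValid)
  simp only [List.all_eq_true] at h ⊢
  intro x hx
  exact h x (List.mem_of_mem_take hx)

theorem pvWins_snoc (K : Nat) (hK : 1 ≤ K) (p : List Char) (c : Char) :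
    pvWins K (p ++ [c]) =
      pvWins K p ++
        (if K ≤ p.length + 1 ∧ ((p ++ [c]).drop (p.length + 1 - K)).all pvValid = true
         then [min (pvEncF ((p ++ [c]).drop (p.length + 1 - K)))
                   (pvEncR ((p ++ [c]).drop (p.length + 1 - K)))]
         else []) := by
  set w0 := (p ++ [c]).drop (p.length + 1 - K) with hw0
  have hlw0 : K ≤ p.length + 1 → w0.length = K := by
    intro h; simp [hw0]; omega
  by_cases hlen : K ≤ p.length + 1
  · have h1 : (p ++ [c]).length + 1 - K = (p.length + 1 - K) + 1 := by simp; omega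
    unfold pvWins
    rw [h1, List.range_succ, List.filterMap_append]
    congr 1
    · apply List.filterMap_congr
      intro i hi
      simp only [List.mem_range] at hi
      rw [List.drop_append_of_le_length (by omega),
        List.take_append_of_le_length (by simp; omega)]
    · have hdt : ((p ++ [c]).drop (p.length + 1 - K)).take K = w0 := by
        rw [← hw0, List.take_of_length_le (by rw [hlw0 hlen])]
      simp only [List.filterMap_cons, List.filterMap_nil, hdt]
      by_cases hv : w0.all pvValid = true
      · simp [hv, hlen]
      · simp [hv, hlen]
  · have h0 : p.length + 1 - K = 0 := by omega
    have h1 : p.length + 1 + 1 - K = 0 := by omega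
    simp [pvWins, h0, h1, hlen]

theorem pvA_inv (k : Int) (hk : 1 ≤ k) (l : List Char) :
    l.foldl (pvStepA k (2 ^ (2 * k).toNat - 1) (2 ^ (2 * (k - 1)).toNat)) (0, 0, 0, []) =
      (pvEncF (pvS k.toNat l),
       pvEncR (pvS k.toNat l) * 4 ^ (k.toNat - (pvS k.toNat l).length),
       ((pvTW l).length : Int),
       pvWins k.toNat l) := by
  set K := k.toNat with hKdef
  have hK1 : 1 ≤ K := by omega
  have hKk : (K : Int) = k := by omega
  have hmask : (2 : Int) ^ (2 * k).toNat - 1 + 1 = 4 ^ K := by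
    have h2 : (2 * k).toNat = 2 * K := by omega
    rw [h2, pow_mul]; norm_num
  have hhigh : (2 : Int) ^ (2 * (k - 1)).toNat = 4 ^ (K - 1) := by
    have h2 : (2 * (k - 1)).toNat = 2 * (K - 1) := by omega
    rw [h2, pow_mul]; norm_num
  induction l using List.reverseRecOn with
  | nil =>
    have h0 : 1 - K = 0 := by omega
    simp [pvTW, pvS, pvEncF, pvEncR, pvWins, h0]
  | append_singleton p c ih =>
    rw [List.foldl_append, List.foldl_cons, List.foldl_nil, ih]
    set T := pvTW p with hT
    set M := T.length with hM
    have hMp : M ≤ p.length := by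
      have h := List.IsPrefix.length_le (List.takeWhile_prefix (l := p.reverse) pvValid)
      simpa [← hT, ← hM] using h
    cases hc : pvDna2bit? c with
    | none =>
      have hcv : pvValid c = false := by simp [pvValid, hc]
      have hTW' : pvTW (p ++ [c]) = [] := by
        simp [pvTW, hcv]
      have hwins : pvWins K (p ++ [c]) = pvWins K p := by
        rw [pvWins_snoc K hK1]
        have : ¬(K ≤ p.length + 1 ∧ ((p ++ [c]).drop (p.length + 1 - K)).all pvValid = true) := by
          rintro ⟨h1, h2⟩
          rw [List.drop_append_of_le_length (by omega)] at h2
          simp [hcv] at h2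
        rw [if_neg this, List.append_nil]
      simp only [pvStepA, hc, hTW', hwins, pvS, List.take_nil, List.reverse_nil]
      simp [pvEncF, pvEncR]
    | some b =>
      obtain ⟨hbit, hb0, hb3, hrc, hcv⟩ := pvBit_of_some hc
      have hTW' : pvTW (p ++ [c]) = c :: T := by
        simp [pvTW, hcv]
        exact hT.symm
      -- the window of the snoc list, when it exists, is the new suffix state
      have hS' : pvS K (p ++ [c]) = ((T.take (K - 1)).reverse) ++ [c] := by
        rw [pvS, hTW']
        conv_lhs => rw [show K = (K - 1) + 1 from by omega]
        rw [List.take_succ_cons, List.reverse_cons]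
      have hSvalid := pvS_all_valid K p
      have hS'valid := pvS_all_valid K (p ++ [c])
      have hSlen : (pvS K p).length = min K M := by
        simp only [pvS, List.length_reverse, List.length_take, ← hT, ← hM]
      have hS'len : (pvS K (p ++ [c])).length = min K (M + 1) := by simp [pvS, hTW']; omega
      have hrev : ((p ++ [c]).drop (p.length + 1 - K)).reverse = (p ++ [c]).reverse.take K := by
        have h := pvWindow_reverse (p ++ [c]) K
        rwa [show (p ++ [c]).length = p.length + 1 by simp] at h
      have hallw0 : ((p ++ [c]).drop (p.length + 1 - K)).all pvValid
          = ((p ++ [c]).reverse.take K).all pvValid := by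
        rw [← hrev, List.all_reverse]
      have htw_eq : ((p ++ [c]).reverse).takeWhile pvValid = c :: T := hTW'
      have hwin_iff : (K ≤ p.length + 1 ∧
          ((p ++ [c]).drop (p.length + 1 - K)).all pvValid = true) ↔ K ≤ M + 1 := by
        rw [hallw0]
        constructor
        · rintro ⟨h1, h2⟩
          have h3 := (pvTW_len_iff ((p ++ [c]).reverse) K (by simp; omega)).mpr h2
          rw [htw_eq] at h3; simpa using h3
        · intro h1
          have hlen2 : K ≤ ((p ++ [c]).reverse).length := by simp; omega
          refine ⟨by omega, (pvTW_len_iff _ K hlen2).mp ?_⟩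
          rw [htw_eq]; simpa using h1
      have hw0_eq : K ≤ M + 1 → (p ++ [c]).drop (p.length + 1 - K) = pvS K (p ++ [c]) := by
        intro h1
        apply List.reverse_injective
        have htl : K ≤ (((p ++ [c]).reverse).takeWhile pvValid).length := by
          rw [htw_eq]; simpa using h1
        rw [hrev, pvS, List.reverse_reverse, pvTW, pvTW_take_eq htl]
      have hvd : ∀ x ∈ T, pvValid x = true := by
        intro x hx
        have := List.all_takeWhile (l := p.reverse) (p := pvValid)
        simp only [List.all_eq_true] at this
        exact this x hx
      have hKey : (pvEncF (pvS K p) * 4 + b) % (4:Int) ^ K = pvEncF (pvS K (p ++ [c])) ∧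
          (pvEncR (pvS K p) * 4 ^ (K - (pvS K p).length)) >>> (2:Nat) + (3 - b) * 4 ^ (K - 1)
            = pvEncR (pvS K (p ++ [c])) * 4 ^ (K - (pvS K (p ++ [c])).length) := by
        rcases Nat.lt_or_ge M K with hMK | hMK
        -- run shorter than K: the suffix state grows by one character
        · have hsK : pvS K p = T.reverse := by
            rw [pvS, ← hT, List.take_of_length_le (by omega)]
          have hs'_eq : pvS K (p ++ [c]) = pvS K p ++ [c] := by
            rw [hS', List.take_of_length_le (by omega), hsK]
          have hlS : (pvS K p).length = M := by rw [hSlen]; omega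
          have hlS' : (pvS K (p ++ [c])).length = M + 1 := by rw [hS'len]; omega
          have hbF' := pvEncF_bounds hS'valid
          have hEF : pvEncF (pvS K (p ++ [c])) = pvEncF (pvS K p) * 4 + b := by
            rw [hs'_eq, pvEncF_append, hbit]
          constructor
          · rw [← hEF]
            refine Int.emod_eq_of_lt hbF'.1 ?_
            calc pvEncF (pvS K (p ++ [c])) < 4 ^ (pvS K (p ++ [c])).length := hbF'.2
              _ ≤ 4 ^ K := by
                  rw [hlS']
                  exact pow_le_pow_right₀ (by norm_num) (by omega)
          · obtain ⟨j, hj⟩ : ∃ j, K - M = j + 1 := ⟨K - M - 1, by omega⟩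
            have e3 : K - (M + 1) = j := by omega
            have eK1 : K - 1 = M + j := by omega
            rw [hlS, hlS', hs'_eq, pvEncR_append, hbit, hlS, e3, hj, pow_succ,
              Int.shiftRight_eq_div_pow, show (((2:Nat) ^ (2:Nat) : Nat) : Int) = 4 by norm_num,
              ← mul_assoc, Int.mul_ediv_cancel _ (by norm_num), eK1, pow_add]
            ring
        -- full window: the suffix state shifts by one character
        · have hd : K - 1 < T.length := by omega
          have htk : T.take K = T.take (K - 1) ++ [T[K - 1]'hd] := by
            conv_lhs => rw [show K = (K - 1) + 1 from by omega]
            exact List.take_succ_eq_append_getElem hd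
          have hsK : pvS K p = T[K - 1]'hd :: (T.take (K - 1)).reverse := by
            rw [pvS, ← hT, htk, List.reverse_append]; simp
          set u := (T.take (K - 1)).reverse with hu
          have hulen : u.length = K - 1 := by simp [hu]; omega
          have hs'_eq : pvS K (p ++ [c]) = u ++ [c] := hS'
          have hlS : (pvS K p).length = K := by rw [hSlen]; omega
          have hlS' : (pvS K (p ++ [c])).length = K := by rw [hS'len]; omega
          have hdval : pvValid (T[K - 1]'hd) = true := hvd _ (List.getElem_mem hd)
          obtain ⟨hd0, hd3⟩ := pvBit_bounds hdval
          have huval : u.all pvValid = true := by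
            rw [hu, List.all_reverse]
            simp only [List.all_eq_true]
            intro x hx
            exact hvd x (List.mem_of_mem_take hx)
          have hcuval : (u ++ [c]).all pvValid = true := by rw [← hs'_eq]; exact hS'valid
          obtain ⟨hFu0, hFu⟩ := pvEncF_bounds hcuval
          obtain ⟨hRu0, -⟩ := pvEncR_bounds huval
          constructor
          · have hstep : (pvBit (T[K - 1]'hd) * 4 ^ (K - 1) + pvEncF u) * 4 + b
                = pvEncF (u ++ [c]) + pvBit (T[K - 1]'hd) * 4 ^ K := by
              rw [pvEncF_append, hbit, show (4:Int) ^ K = 4 ^ (K - 1) * 4 by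
                rw [← pow_succ]; congr 1; omega]
              ring
            rw [hsK, pvEncF_cons, hulen, hstep, Int.add_mul_emod_self_right, hs'_eq]
            refine Int.emod_eq_of_lt hFu0 ?_
            have hlen : (u ++ [c]).length = K := by simp [hulen]; omega
            rwa [hlen] at hFu
          · have hdiv : (pvEncR u * 4 + (3 - pvBit (T[K - 1]'hd))) / 4 = pvEncR u := by
              rw [add_comm, Int.add_mul_ediv_right _ _ (by norm_num : (4:Int) ≠ 0),
                Int.ediv_eq_zero_of_lt (by omega) (by omega)]
              ring
            rw [hlS, hlS', Nat.sub_self, pow_zero, mul_one, mul_one, hsK, pvEncR_cons,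
              Int.shiftRight_eq_div_pow, show (((2:Nat) ^ (2:Nat) : Nat) : Int) = 4 by norm_num, hdiv,
              hs'_eq, pvEncR_append, hbit, hulen]
            ring
      have hmod : PySem.Int.mod (pvEncF (pvS K p) * 4 + b) (2 ^ (2 * k).toNat - 1 + 1)
          = pvEncF (pvS K (p ++ [c])) := by
        rw [hmask, PySem.Int.mod_eq_emod_of_pos (by positivity), hKey.1]
      have hshift : (pvEncR (pvS K p) * 4 ^ (K - (pvS K p).length)) >>> (2:Nat)
          + pvRc2bit b * 2 ^ (2 * (k - 1)).toNat
          = pvEncR (pvS K (p ++ [c])) * 4 ^ (K - (pvS K (p ++ [c])).length) := by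
        rw [hhigh, hrc, hKey.2]
      simp only [pvStepA, hc, hmod, hshift, Prod.mk.injEq]
      refine ⟨trivial, trivial, ?_, ?_⟩
      · rw [hTW', List.length_cons]
        push_cast [← hM]
        ring
      · rw [pvWins_snoc K hK1]
        by_cases hy : K ≤ M + 1
        · rw [if_pos (show k ≤ (M:Int) + 1 from by omega),
            if_pos (hwin_iff.mpr hy), hw0_eq hy, hS'len,
            show min K (M + 1) = K from by omega, Nat.sub_self, pow_zero, mul_one]
        · rw [if_neg (show ¬ k ≤ (M:Int) + 1 from by omega),
            if_neg (fun hcond => hy (hwin_iff.mp hcond)), List.append_nil]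

theorem pvA_eq_wins (seq : String) (k : Int) (hk : 1 ≤ k) :
    rolling_canonical_kmers seq k = pvWins k.toNat seq.toList := by
  unfold rolling_canonical_kmers
  by_cases h : (seq.toList.length : Int) < k
  · rw [if_pos h, pvWins, show seq.toList.length + 1 - k.toNat = 0 from by omega]
    simp
  · rw [if_neg h]
    show (seq.toList.foldl
        (pvStepA k (2 ^ (2 * k).toNat - 1) (2 ^ (2 * (k - 1)).toNat)) (0, 0, 0, [])).2.2.2 = _
    rw [pvA_inv k hk seq.toList]

theorem pvFilterMap_ite {α β : Type} (l : List α) (p : α → Bool) (f : α → β) :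
    l.filterMap (fun x => if p x then some (f x) else none) = (l.filter p).map f := by
  induction l with
  | nil => rfl
  | cons a t ih => by_cases h : p a <;> simp [h, ih]

theorem pvFoldl_yield {α β : Type} (l : List α) (p : α → Bool) (f : α → β) :
    l.foldl (fun out x => if p x then out ++ [f x] else out) []
      = l.filterMap (fun x => if p x then some (f x) else none) := by
  rw [PySem.List.foldl_append_if, pvFilterMap_ite, List.nil_append]

theorem pvB_body (w : List Char) (hw : w.all pvValid = true) :
    w.reverse.foldl (fun r c => r * 4 + pvRc2bit ((pvDna2bit? c).getD 0)) 0 = pvEncR w := by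
  unfold pvEncR
  apply PySem.List.foldl_congr_mem
  intro acc x hx
  have hv : pvValid x = true := by
    rw [List.mem_reverse] at hx
    exact (List.all_eq_true.mp hw) x hx
  obtain ⟨b, hb⟩ : ∃ b, pvDna2bit? x = some b := Option.isSome_iff_exists.mp hv
  obtain ⟨hbit, -, -, hrc, -⟩ := pvBit_of_some hb
  rw [show (pvDna2bit? x).getD 0 = pvBit x from rfl, hbit, hrc]

theorem pvB_eq_wins (seq : String) (k : Int) (hk : 1 ≤ k) :
    rolling_canonical_kmers_alt seq k = pvWins k.toNat seq.toList := by
  unfold rolling_canonical_kmers_alt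
  set data := seq.toList with hdata
  set K := k.toNat with hK
  have hKk : (K : Int) = k := by omega
  show (PySem.List.pyRange 0 ((data.length : Int) - k + 1) 1).foldl
      (fun out i =>
        if ((PySem.List.slice data (some i) (some (i + k))).all
            fun c => (pvDna2bit? c).isSome) = true then
          out ++ [min
            ((PySem.List.slice data (some i) (some (i + k))).foldl
              (fun f c => f * 4 + (pvDna2bit? c).getD 0) 0)
            ((PySem.List.slice data (some i) (some (i + k))).reverse.foldl
              (fun r c => r * 4 + pvRc2bit ((pvDna2bit? c).getD 0)) 0)]
        else out) [] = pvWins K data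
  rw [PySem.List.pyRange_one, List.foldl_map,
    show ((data.length : Int) - k + 1 - 0).toNat = data.length + 1 - K from by omega,
    pvWins,
    ← pvFoldl_yield (List.range (data.length + 1 - K))
      (fun i : Nat => ((data.drop i).take K).all pvValid)
      (fun i : Nat => min (pvEncF ((data.drop i).take K)) (pvEncR ((data.drop i).take K)))]
  congr 1
  funext out i
  have hsl : PySem.List.slice data (some (0 + (i : Int))) (some (0 + (i : Int) + k))
      = (data.drop i).take K := by
    rw [zero_add, ← hKk, PySem.List.slice_natCast_add]
  simp only [hsl]
  by_cases hc : ((data.drop i).take K).all pvValid = true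
  · rw [if_pos hc, if_pos (by simpa [pvValid] using hc), pvB_body _ hc]
    rfl
  · rw [if_neg hc, if_neg (by simpa [pvValid] using hc)]

-- ===== VERDICT (by name: the statement is the Claim_ definition above) =====
theorem rolling_canonical_kmers_spec : Claim_equal_rolling_canonical_kmers := by
  intro seq k _hdom hpre
  unfold Spec_rolling_canonical_kmers
  rw [pvA_eq_wins seq k hpre, pvB_eq_wins seq k hpre]
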